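-- pv_equiv track=rewrite | github.com/KyleDerZweite/pterodeploy | src/test_suite.py | _startup_commands_compatible
-- ===== SOURCE A (Python) =====
-- def _startup_commands_compatible(generated: str, reference: str) -> bool:
--     """Check if startup commands are functionally compatible."""
--     # Extract key components from startup commands
--     gen_parts = set(generated.split())
--     ref_parts = set(reference.split())
--
--     # Key elements that should be present
--     memory_pattern = {"-Xms{{STARTUP_MEMORY}}M", "-Xmx{{MEMORY}}M"}
--
--     # Check if both have memory settings
--     gen_has_memory = any("Xms" in part or "Xmx" in part for part in gen_parts)
--     ref_has_memory = any("Xms" in part or "Xmx" in part for part in ref_parts)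
--
--     if gen_has_memory != ref_has_memory:
--         return False
--
--     # Check for nogui flag
--     gen_has_nogui = any("nogui" in part for part in gen_parts)
--     ref_has_nogui = any("nogui" in part for part in ref_parts)
--
--     if gen_has_nogui != ref_has_nogui:
--         return False
--
--     return True
-- ===== SOURCE B (Python) =====
-- def _startup_commands_compatible(generated: str, reference: str) -> bool:
--     """Check if startup commands are functionally compatible."""
--     # The needles contain no whitespace, so they occur in some split() token
--     # iff they occur in the raw string: no tokenization is needed at all.
--     gen_mem = "Xms" in generated or "Xmx" in generated
--     ref_mem = "Xms" in reference or "Xmx" in reference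
--     return gen_mem == ref_mem and ("nogui" in generated) == ("nogui" in reference)
-- ===== Notes on version B (the rewrite author's own statement) =====
-- stated objective: simpler
-- what changed: B drops tokenization entirely: instead of splitting each command into a set of words and running four any() substring scans over the word sets, it searches the raw strings directly for the whitespace-free needles 'Xms'/'Xmx'/'nogui' and compares the two feature booleans; correct because a needle without whitespace occurs in some split() token iff it occurs in the whole string.
import Mathlib
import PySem

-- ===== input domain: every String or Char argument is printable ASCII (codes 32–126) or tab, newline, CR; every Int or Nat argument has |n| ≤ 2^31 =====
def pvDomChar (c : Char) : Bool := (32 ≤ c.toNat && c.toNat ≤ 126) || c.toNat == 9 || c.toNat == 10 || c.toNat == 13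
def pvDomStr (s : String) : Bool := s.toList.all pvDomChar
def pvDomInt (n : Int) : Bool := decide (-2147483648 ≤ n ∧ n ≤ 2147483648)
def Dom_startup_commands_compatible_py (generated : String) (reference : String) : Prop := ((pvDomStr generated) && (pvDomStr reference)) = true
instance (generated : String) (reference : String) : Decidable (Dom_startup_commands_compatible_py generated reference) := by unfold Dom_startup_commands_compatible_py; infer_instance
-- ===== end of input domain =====

-- B drops the split()/set tokenization of A and searches the raw strings directly for
-- the whitespace-free needles "Xms"/"Xmx"/"nogui" (objective: simpler).

-- ===== PORT A =====
def startup_commands_compatible_py (generated : String) (reference : String) : Bool :=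
  let gen_parts : PySem.Set String := PySem.Set.ofList (PySem.Str.split₀ generated)
  let ref_parts : PySem.Set String := PySem.Set.ofList (PySem.Str.split₀ reference)
  -- memory_pattern is defined but never used in A; kept as dead code
  let _memory_pattern : PySem.Set String :=
    PySem.Set.ofList ["-Xms{{STARTUP_MEMORY}}M", "-Xmx{{MEMORY}}M"]
  let gen_has_memory := gen_parts.any (fun part => PySem.Str.isIn "Xms" part || PySem.Str.isIn "Xmx" part)
  let ref_has_memory := ref_parts.any (fun part => PySem.Str.isIn "Xms" part || PySem.Str.isIn "Xmx" part)
  if gen_has_memory != ref_has_memory then false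
  else
    let gen_has_nogui := gen_parts.any (fun part => PySem.Str.isIn "nogui" part)
    let ref_has_nogui := ref_parts.any (fun part => PySem.Str.isIn "nogui" part)
    if gen_has_nogui != ref_has_nogui then false
    else true

-- ===== PORT B =====
-- no tokenization: substring search on the whole command strings
def startup_commands_compatible_py_alt (generated : String) (reference : String) : Bool :=
  let gen_mem := PySem.Str.isIn "Xms" generated || PySem.Str.isIn "Xmx" generated
  let ref_mem := PySem.Str.isIn "Xms" reference || PySem.Str.isIn "Xmx" reference
  (gen_mem == ref_mem) && (PySem.Str.isIn "nogui" generated == PySem.Str.isIn "nogui" reference)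

-- ===== PRECONDITION & SPEC =====
def Spec_startup_commands_compatible_py (generated : String) (reference : String) (out : Bool) : Prop := out = startup_commands_compatible_py_alt generated reference
instance (generated : String) (reference : String) (out : Bool) : Decidable (Spec_startup_commands_compatible_py generated reference out) := by unfold Spec_startup_commands_compatible_py; infer_instance

-- ===== CLAIM (what is proved, stated in full; the proofs are below) =====
def Claim_equal_startup_commands_compatible_py : Prop := ∀ (generated : String) (reference : String), Dom_startup_commands_compatible_py generated reference → Spec_startup_commands_compatible_py generated reference (startup_commands_compatible_py generated reference)

-- ===== LEMMAS AND PROOFS =====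

-- any over set(xs) = any over xs (same members)
theorem pv_any_ofList (xs : List String) (p : String → Bool) :
    (PySem.Set.ofList xs).any p = xs.any p := by
  rcases h : xs.any p with _ | _
  · simp only [List.any_eq_false] at h ⊢
    intro x hx
    exact h x ((PySem.Set.mem_ofList _ _).1 hx)
  · simp only [List.any_eq_true] at h ⊢
    obtain ⟨x, hx, hp⟩ := h
    exact ⟨x, (PySem.Set.mem_ofList _ _).2 hx, hp⟩

-- a prefix of xs ++ c :: ys avoiding c is a prefix of xs
theorem pv_prefix_append_cons (p xs ys : List Char) (c : Char)
    (hp : c ∉ p) : p <+: xs ++ c :: ys ↔ p <+: xs := by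
  induction xs generalizing p with
  | nil =>
    cases p with
    | nil => simp
    | cons h t =>
      constructor
      · intro hpre
        rcases List.cons_prefix_cons.1 hpre with ⟨rfl, _⟩
        exact absurd (List.mem_cons_self) hp
      · intro hpre; exact absurd hpre (by simp)
  | cons x xs' ih =>
    cases p with
    | nil => simp
    | cons h t =>
      simp only [List.cons_append, List.cons_prefix_cons]
      constructor
      · rintro ⟨rfl, ht⟩
        exact ⟨rfl, (ih t (fun hm => hp (List.mem_cons_of_mem _ hm))).1 ht⟩
      · rintro ⟨rfl, ht⟩
        exact ⟨rfl, (ih t (fun hm => hp (List.mem_cons_of_mem _ hm))).2 ht⟩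

-- an infix of xs ++ c :: ys avoiding c lies in xs or in ys
theorem pv_infix_append_cons (p xs ys : List Char) (c : Char)
    (hne : p ≠ []) (hp : c ∉ p) : p <:+: xs ++ c :: ys ↔ p <:+: xs ∨ p <:+: ys := by
  induction xs with
  | nil =>
    simp only [List.nil_append]
    rw [List.infix_cons_iff]
    constructor
    · rintro (hpre | hinf)
      · exact absurd hpre (by
          cases p with
          | nil => exact absurd rfl hne
          | cons h t =>
            intro hpre
            rcases List.cons_prefix_cons.1 hpre with ⟨rfl, _⟩
            exact hp List.mem_cons_self)
      · exact Or.inr hinf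
    · rintro (hinf | hinf)
      · rcases List.eq_nil_of_infix_nil hinf with rfl; exact absurd rfl hne
      · exact Or.inr hinf
  | cons x xs' ih =>
    simp only [List.cons_append]
    rw [List.infix_cons_iff, List.infix_cons_iff,
        show x :: (xs' ++ c :: ys) = (x :: xs') ++ c :: ys from rfl,
        pv_prefix_append_cons p (x :: xs') ys c hp, ih]
    tauto
-- words: the tokenizer of PySem.Chars.split₀ with the pending reversed word explicit
def pvWords (s : List Char) (cur : List Char) : List (List Char) :=
  match s with
  | [] => if cur.isEmpty then [] else [cur.reverse]
  | c :: rest =>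
    if PySem.Chars.isspace c then
      if cur.isEmpty then pvWords rest [] else cur.reverse :: pvWords rest []
    else pvWords rest (c :: cur)

theorem pv_go_eq_words (s cur : List Char) (acc : List (List Char)) :
    PySem.Chars.split₀.go s cur acc = acc.reverse ++ pvWords s cur := by
  induction s generalizing cur acc with
  | nil =>
    unfold PySem.Chars.split₀.go pvWords
    by_cases h : cur.isEmpty <;> simp [h]
  | cons c rest ih =>
    unfold PySem.Chars.split₀.go pvWords
    by_cases hs : PySem.Chars.isspace c
    · by_cases hc : cur.isEmpty <;> simp [hs, hc, ih]
    · simp [hs, ih]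

-- the key fact: a whitespace-free nonempty needle occurs in some word iff it occurs in the string
theorem pv_words_any (p : List Char) (hne : p ≠ [])
    (hp : ∀ c ∈ p, PySem.Chars.isspace c = false) :
    ∀ (s cur : List Char), (∀ c ∈ cur, PySem.Chars.isspace c = false) →
      ((pvWords s cur).any (fun w => PySem.Chars.isIn p w) = true ↔ p <:+: (cur.reverse ++ s)) := by
  intro s
  induction s with
  | nil =>
    intro cur _
    unfold pvWords
    cases hc : cur.isEmpty with
    | true =>
      rcases List.isEmpty_iff.1 hc with rfl
      simp only [if_true, List.any_nil, List.reverse_nil, List.append_nil]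
      constructor
      · intro h; exact absurd h (by simp)
      · intro h; exact absurd (List.eq_nil_of_infix_nil h) hne
    | false => simp [PySem.Chars.isIn_iff_infix]
  | cons c rest ih =>
    intro cur hcur
    unfold pvWords
    by_cases hs : PySem.Chars.isspace c
    · have hnp : c ∉ p := fun hm => by simp [hp c hm] at hs
      by_cases hc : cur.isEmpty = true
      · rcases List.isEmpty_iff.1 hc with rfl
        simp only [if_pos hs, List.isEmpty_nil, if_true]
        rw [ih [] (by simp)]
        simp only [List.reverse_nil, List.nil_append]
        rw [show (c :: rest) = [] ++ c :: rest from rfl,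
            pv_infix_append_cons p [] rest c hne hnp]
        constructor
        · exact Or.inr
        · rintro (h | h)
          · exact absurd (List.eq_nil_of_infix_nil h) hne
          · exact h
      · simp only [if_pos hs, if_neg hc, List.any_cons]
        rw [Bool.or_eq_true, ih [] (by simp)]
        simp only [List.reverse_nil, List.nil_append, PySem.Chars.isIn_iff_infix]
        rw [pv_infix_append_cons p cur.reverse rest c hne hnp]
    · have hcur' : ∀ x ∈ c :: cur, PySem.Chars.isspace x = false := by
        intro x hx
        rcases List.mem_cons.1 hx with rfl | hx
        · exact Bool.eq_false_iff.2 hs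
        · exact hcur x hx
      simp only [if_neg hs]
      rw [ih (c :: cur) hcur']
      simp

theorem pv_split_any (p : String) (hne : p.toList ≠ [])
    (hp : ∀ c ∈ p.toList, PySem.Chars.isspace c = false) (s : String) :
    (PySem.Str.split₀ s).any (fun w => PySem.Str.isIn p w) = PySem.Str.isIn p s := by
  have h1 : (PySem.Str.split₀ s).any (fun w => PySem.Str.isIn p w)
      = (PySem.Chars.split₀ s.toList).any (fun w => PySem.Chars.isIn p.toList w) := by
    simp [PySem.Str.split₀, List.any_map, Function.comp_def]
  rw [h1]
  have h2 : PySem.Chars.split₀ s.toList = pvWords s.toList [] := by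
    simp [PySem.Chars.split₀, pv_go_eq_words]
  rw [h2]
  have key := pv_words_any p.toList hne hp s.toList [] (by simp)
  simp only [List.reverse_nil, List.nil_append] at key
  have hiff : PySem.Str.isIn p s = true ↔ p.toList <:+: s.toList := PySem.Str.isIn_iff_infix p s
  rcases hh : PySem.Str.isIn p s with _ | _
  · rw [← Bool.not_eq_true]
    intro hc
    have := hiff.2 (key.1 hc)
    rw [hh] at this
    exact Bool.false_ne_true this
  · exact key.2 (hiff.1 hh)

-- the three needles are nonempty and whitespace-free
theorem pv_needle_Xms : ("Xms" : String).toList ≠ [] ∧ ∀ c ∈ ("Xms" : String).toList, PySem.Chars.isspace c = false := by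
  constructor
  · simp
  · intro c hc
    simp only [show ("Xms" : String).toList = ['X','m','s'] from rfl, List.mem_cons,
      List.not_mem_nil, or_false] at hc
    rcases hc with rfl | rfl | rfl <;> decide
theorem pv_needle_Xmx : ("Xmx" : String).toList ≠ [] ∧ ∀ c ∈ ("Xmx" : String).toList, PySem.Chars.isspace c = false := by
  constructor
  · simp
  · intro c hc
    simp only [show ("Xmx" : String).toList = ['X','m','x'] from rfl, List.mem_cons,
      List.not_mem_nil, or_false] at hc
    rcases hc with rfl | rfl | rfl <;> decide
theorem pv_needle_nogui : ("nogui" : String).toList ≠ [] ∧ ∀ c ∈ ("nogui" : String).toList, PySem.Chars.isspace c = false := by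
  constructor
  · simp
  · intro c hc
    simp only [show ("nogui" : String).toList = ['n','o','g','u','i'] from rfl, List.mem_cons,
      List.not_mem_nil, or_false] at hc
    rcases hc with rfl | rfl | rfl | rfl | rfl <;> decide

theorem pv_mem_flag (s : String) :
    (PySem.Str.split₀ s).any (fun w => PySem.Str.isIn "Xms" w || PySem.Str.isIn "Xmx" w)
      = (PySem.Str.isIn "Xms" s || PySem.Str.isIn "Xmx" s) := by
  have : (PySem.Str.split₀ s).any (fun w => PySem.Str.isIn "Xms" w || PySem.Str.isIn "Xmx" w)
      = ((PySem.Str.split₀ s).any (fun w => PySem.Str.isIn "Xms" w)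
         || (PySem.Str.split₀ s).any (fun w => PySem.Str.isIn "Xmx" w)) := by
    induction PySem.Str.split₀ s with
    | nil => simp
    | cons x xs ih =>
      simp only [List.any_cons, ih]
      rcases PySem.Str.isIn "Xms" x with _ | _ <;>
      rcases PySem.Str.isIn "Xmx" x with _ | _ <;>
      rcases xs.any (fun w => PySem.Str.isIn "Xms" w) with _ | _ <;>
      rcases xs.any (fun w => PySem.Str.isIn "Xmx" w) with _ | _ <;> simp
  rw [this, pv_split_any _ pv_needle_Xms.1 pv_needle_Xms.2,
      pv_split_any _ pv_needle_Xmx.1 pv_needle_Xmx.2]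

-- ===== VERDICT (by name: the statement is the Claim_ definition above) =====
theorem startup_commands_compatible_py_spec : Claim_equal_startup_commands_compatible_py := by
  intro generated reference _
  unfold Spec_startup_commands_compatible_py
  unfold startup_commands_compatible_py startup_commands_compatible_py_alt
  simp only [pv_any_ofList, pv_mem_flag,
    pv_split_any _ pv_needle_nogui.1 pv_needle_nogui.2]
  rcases (PySem.Str.isIn "Xms" generated || PySem.Str.isIn "Xmx" generated) with _ | _ <;>
  rcases (PySem.Str.isIn "Xms" reference || PySem.Str.isIn "Xmx" reference) with _ | _ <;>
  rcases PySem.Str.isIn "nogui" generated with _ | _ <;>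
  rcases PySem.Str.isIn "nogui" reference with _ | _ <;>
  simp
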